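-- pv_equiv track=rewrite | github.com/ssaadh/Data-Structures-Algorithms-SWE-LeetCode-Studying | week_4/Coderbyte_1/scratch-practice/stencil_gpt.py | most_frequent_substring
-- ===== SOURCE A (Python) =====
-- def most_frequent_substring(string, n):
--     counts = {}
--     for i in range(len(string)-n+1):
--       substring = string[i:i+n]
--       if substring in counts:
--         counts[substring] += 1
--       else:
--         counts[substring] = 1
--     max_count = max(counts.values())
--     # for substring, count in counts.items():
--     #   if count == max_count:
--     #   candidates
--     candidates = [substring for substring, count in counts.items() if count == max_count]
--     return min(candidates)
-- ===== SOURCE B (Python) =====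
-- def most_frequent_substring(string, n):
--     # One fused pass: maintain the running best (count, substring) while counting,
--     # so no separate max/filter/min passes over the finished dict are needed.
--     counts = {}
--     best_count = 0
--     best = None
--     for i in range(len(string) - n + 1):
--         s = string[i:i+n]
--         c = counts.get(s, 0) + 1
--         counts[s] = c
--         if c > best_count or (c == best_count and s < best):
--             best_count = c
--             best = s
--     return best
-- ===== Notes on version B (the rewrite author's own statement) =====
-- stated objective: alternative
-- what changed: The three selection passes over the finished dict (max of values, candidate comprehension, min) are removed; B maintains a running (best_count, best_substring) argmax with lexicographic tie-break inside the single counting loop, so the answer is ready when the loop ends.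
import Mathlib
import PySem

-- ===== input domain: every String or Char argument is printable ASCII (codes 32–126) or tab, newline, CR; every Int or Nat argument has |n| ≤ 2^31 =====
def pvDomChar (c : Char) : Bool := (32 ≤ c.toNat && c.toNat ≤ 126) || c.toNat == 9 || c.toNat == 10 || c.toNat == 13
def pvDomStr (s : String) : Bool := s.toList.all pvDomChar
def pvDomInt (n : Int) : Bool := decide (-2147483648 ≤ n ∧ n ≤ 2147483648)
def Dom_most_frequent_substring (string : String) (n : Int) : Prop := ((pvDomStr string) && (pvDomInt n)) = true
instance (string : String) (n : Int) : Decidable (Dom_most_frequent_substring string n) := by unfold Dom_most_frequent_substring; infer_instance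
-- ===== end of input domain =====

-- B fuses the selection into the counting loop (running argmax with lexicographic tie-break)
-- instead of A's three passes over the finished dict; equivalence is proved on Pre_ (n ≤ len).

-- ===== PORT A =====
def most_frequent_substring (string : String) (n : Int) : String :=
  let cs := string.toList
  let counts : PySem.Dict (List Char) Int :=
    (PySem.List.pyRange 0 ((cs.length : Int) - n + 1) 1).foldl
      (fun counts i =>
        let substring := PySem.List.slice cs (some i) (some (i + n))
        if counts.contains substring then counts.modify substring 0 (· + 1)
        else counts.insert substring 1)
      PySem.Dict.empty
  -- Python's max()/min() raise on an empty sequence: those inputs are excluded by Pre_, '.getD' only totalizes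
  let max_count : Int := (PySem.List.max? counts.values (fun v => v)).getD 0
  let candidates : List (List Char) :=
    counts.items.foldl (fun acc p => if p.2 = max_count then acc ++ [p.1] else acc) []
  String.ofList ((PySem.List.min? candidates (fun s => s)).getD [])

-- ===== PORT B =====
def most_frequent_substring_alt (string : String) (n : Int) : String :=
  let cs := string.toList
  let st :=
    (PySem.List.pyRange 0 ((cs.length : Int) - n + 1) 1).foldl
      (fun (st : PySem.Dict (List Char) Int × Int × Option (List Char)) i =>
        let s := PySem.List.slice cs (some i) (some (i + n))
        let c := st.1.getD s 0 + 1
        -- '.getD []' only totalizes 's < best': in Python that comparison is reached only when best is set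
        if c > st.2.1 ∨ (c = st.2.1 ∧ s < st.2.2.getD []) then (st.1.insert s c, c, some s)
        else (st.1.insert s c, st.2.1, st.2.2))
      (PySem.Dict.empty, 0, none)
  -- Python B returns None (not a str) when the loop is empty: excluded by Pre_
  String.ofList (st.2.2.getD [])

-- ===== PRECONDITION & SPEC =====
-- Pre_ excludes exactly n > len(string): there A's max() raises ValueError (and B returns None, not a str).
def Pre_most_frequent_substring (string : String) (n : Int) : Prop :=
  n ≤ (string.toList.length : Int)
instance (string : String) (n : Int) : Decidable (Pre_most_frequent_substring string n) := by
  unfold Pre_most_frequent_substring; infer_instance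

def pvWitness_most_frequent_substring : String × Int := ("banana", 2)

def Spec_most_frequent_substring (string : String) (n : Int) (out : String) : Prop := out = most_frequent_substring_alt string n
instance (string : String) (n : Int) (out : String) : Decidable (Spec_most_frequent_substring string n out) := by unfold Spec_most_frequent_substring; infer_instance

-- ===== CLAIM (what is proved, stated in full; the proofs are below) =====
def Claim_equal_most_frequent_substring : Prop := ∀ (string : String) (n : Int), Dom_most_frequent_substring string n → Pre_most_frequent_substring string n → Spec_most_frequent_substring string n (most_frequent_substring string n)

-- ===== LEMMAS AND PROOFS =====

-- B's loop body (on the substring list)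
def mfsStepB (st : PySem.Dict (List Char) Int × Int × Option (List Char)) (s : List Char) :
    PySem.Dict (List Char) Int × Int × Option (List Char) :=
  let c := st.1.getD s 0 + 1
  if c > st.2.1 ∨ (c = st.2.1 ∧ s < st.2.2.getD []) then (st.1.insert s c, c, some s)
  else (st.1.insert s c, st.2.1, st.2.2)

-- the counting dict, in B's (insert) form
def mfsDict (ss : List (List Char)) : PySem.Dict (List Char) Int :=
  ss.foldl (fun d s => d.insert s (d.getD s 0 + 1)) PySem.Dict.empty

-- A's loop body equals B's dict update
lemma mfsStepA_eq (d : PySem.Dict (List Char) Int) (s : List Char) :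
    (if d.contains s then d.modify s 0 (· + 1) else d.insert s 1) = d.insert s (d.getD s 0 + 1) := by
  by_cases h : d.contains s = true
  · simp [h]; rfl
  · have h0 : d.getD s 0 = 0 := PySem.Dict.getD_of_not_contains d 0 (by simpa using h)
    simp [h, h0]

-- the loop invariant: B's state carries the dict, the max count, and the lexicographically least key achieving it
lemma mfs_loop_inv (ss : List (List Char)) :
    (ss.foldl mfsStepB (PySem.Dict.empty, 0, none)).1 = mfsDict ss ∧
    (mfsDict ss).keys.Nodup ∧
    (ss = [] → ss.foldl mfsStepB (PySem.Dict.empty, 0, none) = (PySem.Dict.empty, 0, none)) ∧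
    (ss ≠ [] → ∃ m,
      (ss.foldl mfsStepB (PySem.Dict.empty, 0, none)).2.2 = some m ∧
      (m, (ss.foldl mfsStepB (PySem.Dict.empty, 0, none)).2.1) ∈ (mfsDict ss).items ∧
      (∀ p ∈ (mfsDict ss).items, p.2 ≤ (ss.foldl mfsStepB (PySem.Dict.empty, 0, none)).2.1) ∧
      (∀ p ∈ (mfsDict ss).items, p.2 = (ss.foldl mfsStepB (PySem.Dict.empty, 0, none)).2.1 → m ≤ p.1)) := by
  induction ss using List.reverseRecOn with
  | nil =>
    refine ⟨rfl, by simp [mfsDict], fun _ => rfl, fun h => absurd rfl h⟩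
  | append_singleton ss s ih =>
    obtain ⟨hd, hnd, -, hne⟩ := ih
    have hdictapp : mfsDict (ss ++ [s]) = (mfsDict ss).insert s ((mfsDict ss).getD s 0 + 1) := by
      simp [mfsDict, List.foldl_append]
    have hfold : (ss ++ [s]).foldl mfsStepB (PySem.Dict.empty, 0, none)
        = mfsStepB (ss.foldl mfsStepB (PySem.Dict.empty, 0, none)) s := by
      simp [List.foldl_append]
    by_cases hss : ss = []
    · subst hss
      simp only [List.nil_append] at *
      have hstep : mfsStepB (PySem.Dict.empty, 0, none) s
          = ((PySem.Dict.empty : PySem.Dict (List Char) Int).insert s 1, 1, some s) := by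
        simp [mfsStepB, PySem.Dict.getD_empty]
      have hdict : mfsDict [s] = (PySem.Dict.empty : PySem.Dict (List Char) Int).insert s 1 := by
        simp [mfsDict, PySem.Dict.getD_empty]
      have hitems : ((PySem.Dict.empty : PySem.Dict (List Char) Int).insert s 1).items = [(s, 1)] := by
        rw [PySem.Dict.items_insert_of_not_contains _ _ (PySem.Dict.contains_empty s)]
        rfl
      refine ⟨?_, ?_, by simp, fun _ => ⟨s, ?_, ?_, ?_, ?_⟩⟩
      · simp [hstep, hdict]
      · rw [hdict]; exact PySem.Dict.nodup_keys_insert _ _ _ (by simp)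
      · simp [hstep]
      · simp [hstep, hdict]; exact PySem.Dict.mem_items_insert_self _ _ _
      · intro p hp; rw [hdict, hitems] at hp; simp at hp; simp [hstep, hp]
      · intro p hp _; rw [hdict, hitems] at hp; simp at hp; simp [hp]
    · obtain ⟨m, hb, hmem, hub, hmin⟩ := hne hss
      rw [hfold, hdictapp]
      set st := ss.foldl mfsStepB (PySem.Dict.empty, 0, none) with hst
      set d := mfsDict ss with hdd
      set c := d.getD s 0 + 1 with hc
      have hstep : mfsStepB st s
          = if c > st.2.1 ∨ (c = st.2.1 ∧ s < m) then (d.insert s c, c, some s)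
            else (d.insert s c, st.2.1, st.2.2) := by
        simp [mfsStepB, hd, hb, ← hc]
      have hnd' : ((d.insert s c).keys).Nodup := PySem.Dict.nodup_keys_insert _ _ _ hnd
      rw [hstep]
      by_cases hcond : c > st.2.1 ∨ (c = st.2.1 ∧ s < m)
      · rw [if_pos hcond]
        rcases hcond with hgt | ⟨heq, hlt⟩
        · refine ⟨rfl, hnd', by simp, fun _ => ⟨s, rfl, PySem.Dict.mem_items_insert_self _ _ _, ?_, ?_⟩⟩
          · intro p hp
            rcases (PySem.Dict.mem_items_insert d s c p).mp hp with rfl | ⟨hpo, -⟩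
            · exact le_refl _
            · exact le_of_lt (lt_of_le_of_lt (hub p hpo) hgt)
          · intro p hp hpc
            rcases (PySem.Dict.mem_items_insert d s c p).mp hp with rfl | ⟨hpo, -⟩
            · exact le_refl _
            · have hpc' : p.2 = c := hpc
              have := hub p hpo
              omega
        · refine ⟨rfl, hnd', by simp, fun _ => ⟨s, rfl, PySem.Dict.mem_items_insert_self _ _ _, ?_, ?_⟩⟩
          · intro p hp
            rcases (PySem.Dict.mem_items_insert d s c p).mp hp with rfl | ⟨hpo, -⟩
            · exact le_refl _
            · exact le_trans (hub p hpo) (le_of_eq heq.symm)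
          · intro p hp hpc
            rcases (PySem.Dict.mem_items_insert d s c p).mp hp with rfl | ⟨hpo, -⟩
            · exact le_refl _
            · have hpc' : p.2 = c := hpc
              exact le_of_lt (lt_of_lt_of_le hlt (hmin p hpo (by omega)))
      · rw [if_neg hcond]
        have hle : c ≤ st.2.1 := not_lt.mp (fun h => hcond (Or.inl h))
        have himp : c = st.2.1 → m ≤ s := fun hceq => not_lt.mp (fun h => hcond (Or.inr ⟨hceq, h⟩))
        have hms : m ≠ s := by
          intro hms; subst hms
          have : d.getD m 0 = st.2.1 := PySem.Dict.getD_of_mem_items d hmem hnd 0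
          omega
        refine ⟨rfl, hnd', by simp, fun _ => ⟨m, hb, ?_, ?_, ?_⟩⟩
        · exact (PySem.Dict.mem_items_insert d s c _).mpr (Or.inr ⟨hmem, hms⟩)
        · intro p hp
          rcases (PySem.Dict.mem_items_insert d s c p).mp hp with rfl | ⟨hpo, -⟩
          · exact hle
          · exact hub p hpo
        · intro p hp hpc
          rcases (PySem.Dict.mem_items_insert d s c p).mp hp with rfl | ⟨hpo, -⟩
          · have hpc' : c = st.2.1 := hpc
            exact himp hpc'
          · exact hmin p hpo hpc

-- extraction: A's three passes read exactly B's final best off the finished dict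
lemma mfs_extract (d : PySem.Dict (List Char) Int) (bc : Int) (m : List Char)
    (_hnd : d.keys.Nodup) (hm : (m, bc) ∈ d.items)
    (hub : ∀ p ∈ d.items, p.2 ≤ bc) (hmin : ∀ p ∈ d.items, p.2 = bc → m ≤ p.1) :
    ((PySem.List.min? (d.items.foldl
        (fun acc p => if p.2 = (PySem.List.max? d.values (fun v => v)).getD 0 then acc ++ [p.1] else acc) [])
        (fun s => s)).getD []) = m := by
  have hbcv : bc ∈ d.values := by
    show bc ∈ d.items.map Prod.snd
    exact List.mem_map.mpr ⟨(m, bc), hm, rfl⟩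
  obtain ⟨v, hv⟩ : ∃ v, PySem.List.max? d.values (fun v => v) = some v := by
    cases h : PySem.List.max? d.values (fun v => v) with
    | none => exact absurd ((PySem.List.max?_eq_none_iff _ _).mp h) (List.ne_nil_of_mem hbcv)
    | some v => exact ⟨v, rfl⟩
  have hveq : v = bc := by
    have h1 : bc ≤ v := PySem.List.max?_isMax hv bc hbcv
    have h2 : v ≤ bc := by
      have hvm : v ∈ d.values := PySem.List.max?_mem hv
      obtain ⟨p, hp, hpv⟩ := List.mem_map.mp hvm
      exact hpv ▸ hub p hp
    omega
  rw [hv]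
  simp only [Option.getD_some, hveq]
  rw [PySem.List.foldl_append_ite (p := fun p => p.2 = bc) (f := Prod.fst) d.items []]
  simp only [List.nil_append]
  set C := (d.items.filter fun p => decide (p.2 = bc)).map Prod.fst with hC
  have hmC : m ∈ C := List.mem_map.mpr ⟨(m, bc), List.mem_filter.mpr ⟨hm, by simp⟩, rfl⟩
  have hconv : PySem.List.min? C (fun s => s)
      = @PySem.List.min? (List Char) (List Char) LinearOrder.toPartialOrder.toLT
          LinearOrder.toDecidableLT C (fun s => s) := by
    congr 1
  rw [hconv]
  obtain ⟨x, hx⟩ : ∃ x, @PySem.List.min? (List Char) (List Char) LinearOrder.toPartialOrder.toLT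
      LinearOrder.toDecidableLT C (fun s => s) = some x := by
    cases h : @PySem.List.min? (List Char) (List Char) LinearOrder.toPartialOrder.toLT
        LinearOrder.toDecidableLT C (fun s => s) with
    | none =>
      exact absurd ((@PySem.List.min?_eq_none_iff (List Char) (List Char) LinearOrder.toPartialOrder.toLT LinearOrder.toDecidableLT C (fun s => s)).mp h) (List.ne_nil_of_mem hmC)
    | some x => exact ⟨x, rfl⟩
  have hxm : x = m := by
    have h1 : x ≤ m := by simpa using PySem.List.min?_isMin hx m hmC
    have h2 : m ≤ x := by
      have hxC : x ∈ C := @PySem.List.min?_mem (List Char) (List Char) LinearOrder.toPartialOrder.toLT LinearOrder.toDecidableLT C (fun s => s) x hx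
      obtain ⟨p, hp, hpx⟩ := List.mem_map.mp hxC
      obtain ⟨hpi, hpb⟩ := List.mem_filter.mp hp
      exact hpx ▸ hmin p hpi (by simpa using hpb)
    exact le_antisymm h1 h2
  rw [hx, hxm]
  rfl

theorem mfs_main (string : String) (n : Int) (hpre : Pre_most_frequent_substring string n) :
    most_frequent_substring string n = most_frequent_substring_alt string n := by
  unfold most_frequent_substring most_frequent_substring_alt
  have hlen : n ≤ ((string.toList).length : Int) := hpre
  show String.ofList
      ((PySem.List.min?
        ((List.foldl
            (fun (counts : PySem.Dict (List Char) Int) i =>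
              if counts.contains (PySem.List.slice string.toList (some i) (some (i + n))) then
                counts.modify (PySem.List.slice string.toList (some i) (some (i + n))) 0 (· + 1)
              else counts.insert (PySem.List.slice string.toList (some i) (some (i + n))) 1)
            PySem.Dict.empty
            (PySem.List.pyRange 0 ((string.toList.length : Int) - n + 1) 1)).items.foldl
          (fun acc p =>
            if p.2 = (PySem.List.max?
                (List.foldl
                  (fun (counts : PySem.Dict (List Char) Int) i =>
                    if counts.contains (PySem.List.slice string.toList (some i) (some (i + n))) then
                      counts.modify (PySem.List.slice string.toList (some i) (some (i + n))) 0 (· + 1)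
                    else counts.insert (PySem.List.slice string.toList (some i) (some (i + n))) 1)
                  PySem.Dict.empty
                  (PySem.List.pyRange 0 ((string.toList.length : Int) - n + 1) 1)).values
                (fun v => v)).getD 0
            then acc ++ [p.1] else acc) [])
        (fun s => s)).getD [])
    = String.ofList
      (((PySem.List.pyRange 0 ((string.toList.length : Int) - n + 1) 1).foldl
          (fun st i => mfsStepB st (PySem.List.slice string.toList (some i) (some (i + n))))
          (PySem.Dict.empty, 0, none)).2.2.getD [])
  have hA : List.foldl
      (fun (counts : PySem.Dict (List Char) Int) i =>
        if counts.contains (PySem.List.slice string.toList (some i) (some (i + n))) then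
          counts.modify (PySem.List.slice string.toList (some i) (some (i + n))) 0 (· + 1)
        else counts.insert (PySem.List.slice string.toList (some i) (some (i + n))) 1)
      PySem.Dict.empty
      (PySem.List.pyRange 0 ((string.toList.length : Int) - n + 1) 1)
    = mfsDict ((PySem.List.pyRange 0 ((string.toList.length : Int) - n + 1) 1).map
        (fun i => PySem.List.slice string.toList (some i) (some (i + n)))) := by
    show _ = List.foldl _ _ (List.map _ _)
    rw [List.foldl_map]
    exact PySem.List.foldl_congr_mem _ _ _ _
      (fun acc x _ => mfsStepA_eq acc (PySem.List.slice string.toList (some x) (some (x + n))))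
  have hB : List.foldl
      (fun st i => mfsStepB st (PySem.List.slice string.toList (some i) (some (i + n))))
      (PySem.Dict.empty, 0, none)
      (PySem.List.pyRange 0 ((string.toList.length : Int) - n + 1) 1)
    = List.foldl mfsStepB (PySem.Dict.empty, 0, none)
        ((PySem.List.pyRange 0 ((string.toList.length : Int) - n + 1) 1).map
          (fun i => PySem.List.slice string.toList (some i) (some (i + n)))) := by
    rw [List.foldl_map]
  rw [hA, hB]
  set ss := (PySem.List.pyRange 0 ((string.toList.length : Int) - n + 1) 1).map
      (fun i => PySem.List.slice string.toList (some i) (some (i + n))) with hss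
  have hssne : ss ≠ [] := by
    have h0 : (0 : Int) ∈ PySem.List.pyRange 0 ((string.toList.length : Int) - n + 1) 1 :=
      PySem.List.mem_pyRange_one.mpr ⟨le_refl _, by omega⟩
    intro h
    rw [hss] at h
    exact absurd (List.map_eq_nil_iff.mp h) (List.ne_nil_of_mem h0)
  obtain ⟨hd, hnd, -, hne⟩ := mfs_loop_inv ss
  obtain ⟨m, hb, hmem, hub, hmin⟩ := hne hssne
  rw [hb, mfs_extract (mfsDict ss) _ m hnd hmem hub hmin]
  rfl

-- ===== VERDICT (by name: the statement is the Claim_ definition above) =====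
theorem most_frequent_substring_spec : Claim_equal_most_frequent_substring := by
  intro string n _ hpre
  unfold Spec_most_frequent_substring
  exact mfs_main string n hpre
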